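-- pv_equiv track=rewrite | github.com/pharmbio/dl_quantmap | supp_scripts/supp_utils.py | sort_smiles_label
-- ===== SOURCE A (Python) =====
-- def sort_smiles_label(smiles_label):
--     labels = sorted(set(list(smiles_label.values())))
--
--     output_smiles_label = {}
--
--     for label in labels:
--         current_set_of_smiles = []
--
--         for smiles in smiles_label:
--             if smiles_label[smiles] == label:
--                 current_set_of_smiles.append(smiles)
--
--         sorted_list = sorted(current_set_of_smiles)
--
--         for smiles in sorted_list:
--             output_smiles_label[smiles] = label
--
--     return (output_smiles_label)
-- ===== SOURCE B (Python) =====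
-- def sort_smiles_label(smiles_label):
--     return dict(sorted(smiles_label.items(), key=lambda kv: (kv[1], kv[0])))
-- ===== Notes on version B (the rewrite author's own statement) =====
-- stated objective: simpler
-- what changed: Replaces the per-label scan over the whole dict (one full pass per distinct label, plus a sort per bucket, then re-insertion) by a single sort of the items under the tuple key (label, smiles).
import Mathlib
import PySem

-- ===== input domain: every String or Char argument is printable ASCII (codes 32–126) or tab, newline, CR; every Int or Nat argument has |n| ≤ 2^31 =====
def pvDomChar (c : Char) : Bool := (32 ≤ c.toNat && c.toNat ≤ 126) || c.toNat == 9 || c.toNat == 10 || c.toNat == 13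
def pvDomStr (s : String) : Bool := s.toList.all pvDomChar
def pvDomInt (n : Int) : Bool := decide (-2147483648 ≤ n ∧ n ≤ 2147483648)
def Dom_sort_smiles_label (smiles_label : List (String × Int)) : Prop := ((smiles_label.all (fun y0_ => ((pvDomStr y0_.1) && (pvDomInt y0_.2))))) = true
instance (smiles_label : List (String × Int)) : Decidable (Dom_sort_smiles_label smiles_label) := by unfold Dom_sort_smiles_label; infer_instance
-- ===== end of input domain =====

-- B replaces A's one-full-scan-per-distinct-label grouping by a single sort of the
-- items under the tuple key (label, smiles) (objective: simpler).

-- ===== PORT A =====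
def sort_smiles_label (smiles_label : List (String × Int)) : List (String × Int) :=
  let d := PySem.Dict.mk smiles_label
  let labels := PySem.List.sorted (PySem.Set.ofList (smiles_label.map Prod.snd)) (fun x => x)
  (labels.foldl (fun output_smiles_label label =>
      let current_set_of_smiles := (smiles_label.map Prod.fst).foldl
        (fun acc smiles => if d.get? smiles == some label then acc ++ [smiles] else acc) []
      let sorted_list := PySem.List.sorted current_set_of_smiles (fun x => x)
      sorted_list.foldl (fun output smiles => output.insert smiles label) output_smiles_label)
    PySem.Dict.empty).items

-- ===== PORT B =====
def sort_smiles_label_alt (smiles_label : List (String × Int)) : List (String × Int) :=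
  (PySem.Dict.ofList (PySem.List.sorted2 smiles_label (fun kv => kv.2) (fun kv => kv.1))).items

-- ===== PRECONDITION & SPEC =====
-- Pre_ excludes association lists with duplicate keys: A's argument is a Python dict,
-- whose association-list encoding always has pairwise-distinct keys.
def Pre_sort_smiles_label (smiles_label : List (String × Int)) : Prop :=
  (smiles_label.map Prod.fst).Nodup
instance (smiles_label : List (String × Int)) : Decidable (Pre_sort_smiles_label smiles_label) := by
  unfold Pre_sort_smiles_label; infer_instance

def pvWitness_sort_smiles_label : (List (String × Int)) := [("b", 1), ("a", 0), ("c", 1)]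

def Spec_sort_smiles_label (smiles_label : List (String × Int)) (out : List (String × Int)) : Prop := out = sort_smiles_label_alt smiles_label
instance (smiles_label : List (String × Int)) (out : List (String × Int)) : Decidable (Spec_sort_smiles_label smiles_label out) := by unfold Spec_sort_smiles_label; infer_instance

-- ===== CLAIM (what is proved, stated in full; the proofs are below) =====
def Claim_equal_sort_smiles_label : Prop := ∀ (smiles_label : List (String × Int)), Dom_sort_smiles_label smiles_label → Pre_sort_smiles_label smiles_label → Spec_sort_smiles_label smiles_label (sort_smiles_label smiles_label)

-- ===== LEMMAS AND PROOFS =====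

-- the per-label bucket of keys (in insertion order), the sorted distinct labels,
-- and the common normal form both ports are proved equal to
def pvBucket (d : List (String × Int)) (v : Int) : List String :=
  (d.filter (fun kv => kv.2 == v)).map Prod.fst

def pvLabels (d : List (String × Int)) : List Int :=
  PySem.List.sorted (PySem.Set.ofList (d.map Prod.snd)) (fun x => x)

def pvYs (d : List (String × Int)) : List (String × Int) :=
  (pvLabels d).flatMap (fun v =>
    (PySem.List.sorted (pvBucket d v) (fun x => x)).map (fun s => (s, v)))

theorem pvBucket_nodup (d : List (String × Int)) (h : (d.map Prod.fst).Nodup) (v : Int) :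
    (pvBucket d v).Nodup := by
  have hs : (d.filter (fun kv => kv.2 == v)).Sublist d := List.filter_sublist
  exact (hs.map Prod.fst).nodup h

theorem pvBucket_mem {d : List (String × Int)} {v : Int} {s : String} :
    s ∈ pvBucket d v ↔ (s, v) ∈ d := by
  simp only [pvBucket, List.mem_map, List.mem_filter, beq_iff_eq]
  constructor
  · rintro ⟨kv, ⟨hm, hv⟩, hs⟩
    have : kv = (s, v) := by cases kv; simp_all
    simpa [this] using hm
  · intro hm; exact ⟨(s, v), ⟨hm, rfl⟩, rfl⟩

theorem pvBucket_disjoint {d : List (String × Int)} (h : (d.map Prod.fst).Nodup)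
    {s : String} {v v' : Int} (h1 : s ∈ pvBucket d v) (h2 : s ∈ pvBucket d v') : v = v' := by
  rw [pvBucket_mem] at h1 h2
  have := List.inj_on_of_nodup_map h h1 h2 rfl
  simpa using congrArg Prod.snd this

theorem pvLabels_nodup (d : List (String × Int)) : (pvLabels d).Nodup := by
  exact ((PySem.List.sorted_perm _ _ _).nodup_iff).mpr (PySem.Set.nodup_ofList _)

theorem pvStrict {α κ : Type} [LinearOrder κ] (xs : List α) (key : α → κ)
    (hnd : xs.Nodup) (hinj : ∀ a ∈ xs, ∀ b ∈ xs, key a = key b → a = b) :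
    (PySem.List.sorted xs key).Pairwise (fun a b => key a < key b) := by
  have hperm := PySem.List.sorted_perm xs key false
  have hle := PySem.List.sorted_pairwise xs key
  have hnd' : (PySem.List.sorted xs key).Nodup := hperm.nodup_iff.mpr hnd
  have hmem : ∀ x ∈ PySem.List.sorted xs key, x ∈ xs := fun x hx => hperm.mem_iff.mp hx
  apply List.Pairwise.imp_of_mem (R := fun a b => key a ≤ key b ∧ a ≠ b)
  · intro a b ha hb hr
    exact lt_of_le_of_ne hr.1 (fun he => hr.2 (hinj a (hmem a ha) b (hmem b hb) he))
  · exact hle.and hnd'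

theorem pvLabels_lt (d : List (String × Int)) : (pvLabels d).Pairwise (· < ·) := by
  exact pvStrict (PySem.Set.ofList (d.map Prod.snd)) (fun x => x)
    (PySem.Set.nodup_ofList _) (by intro a _ b _ h; exact h)

-- inner loop: A's key scan with dict lookup is the per-label bucket
theorem pvCurrent_eq (d : List (String × Int)) (h : (d.map Prod.fst).Nodup) (v : Int) :
    (d.map Prod.fst).filter (fun s => (PySem.Dict.mk d).get? s == some v) = pvBucket d v := by
  rw [List.filter_map]
  unfold pvBucket
  congr 1
  apply List.filter_congr
  intro kv hm
  have hitems : (kv.1, kv.2) ∈ (PySem.Dict.mk d).items := by simpa using hm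
  have hget := PySem.Dict.get?_of_mem_items (PySem.Dict.mk d) hitems (by simpa using h)
  simp [Function.comp_apply, hget]

-- outer loop: successive fresh insertions append the sorted buckets
theorem pvOuter (d : List (String × Int)) (hnd : (d.map Prod.fst).Nodup)
    (ls : List Int) (out : PySem.Dict String Int) (hls : ls.Nodup)
    (hk : out.keys.Nodup)
    (hfresh : ∀ s v', v' ∈ ls → s ∈ pvBucket d v' → out.contains s = false) :
    (ls.foldl (fun output v =>
        (PySem.List.sorted (pvBucket d v) (fun x => x)).foldl
          (fun output s => output.insert s v) output) out).items
      = out.items ++ ls.flatMap (fun v =>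
          (PySem.List.sorted (pvBucket d v) (fun x => x)).map (fun s => (s, v))) := by
  induction ls generalizing out with
  | nil => simp
  | cons v t ih =>
    have hslperm := PySem.List.sorted_perm (pvBucket d v) (fun x => x) false
    have hslnd : (PySem.List.sorted (pvBucket d v) (fun x => x)).Nodup :=
      hslperm.nodup_iff.mpr (pvBucket_nodup d hnd v)
    have hfr : ∀ a ∈ PySem.List.sorted (pvBucket d v) (fun x => x),
        out.contains ((fun s => s) a) = false :=
      fun a ha => hfresh a v (List.mem_cons_self) (hslperm.subset ha)
    have hitems := PySem.Dict.items_foldl_insert_fresh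
      (PySem.List.sorted (pvBucket d v) (fun x => x)) (fun s => s) (fun _ => v) out hfr
      (by simpa using hslnd)
    have hkeys := PySem.Dict.keys_foldl_insert
      (PySem.List.sorted (pvBucket d v) (fun x => x)) (fun _ _ => v) out
    have hknd := PySem.Dict.nodup_keys_foldl_insert
      (PySem.List.sorted (pvBucket d v) (fun x => x)) (fun _ _ => v) out hk
    simp only [List.foldl_cons, List.flatMap_cons]
    rw [ih _ (List.nodup_cons.mp hls).2 hknd ?_, hitems]
    · simp [List.append_assoc]
    · intro s v' hv' hbs
      rw [Bool.eq_false_iff]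
      intro hcont
      rw [PySem.Dict.contains_iff_mem_keys, hkeys, PySem.Set.mem_update] at hcont
      rcases hcont with hmem | hmem
      · have := hfresh s v' (List.mem_cons_of_mem _ hv') hbs
        rw [Bool.eq_false_iff] at this
        exact this ((PySem.Dict.contains_iff_mem_keys _ _).mpr hmem)
      · have hsb : s ∈ pvBucket d v := hslperm.subset hmem
        have : v' = v := pvBucket_disjoint hnd hbs hsb
        exact (List.nodup_cons.mp hls).1 (this ▸ hv')

theorem pvA_eq (d : List (String × Int)) (h : (d.map Prod.fst).Nodup) :
    sort_smiles_label d = pvYs d := by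
  have hstep : (fun (output : PySem.Dict String Int) (label : Int) =>
      let current_set_of_smiles := (d.map Prod.fst).foldl
        (fun acc smiles => if (PySem.Dict.mk d).get? smiles == some label then acc ++ [smiles] else acc) []
      let sorted_list := PySem.List.sorted current_set_of_smiles (fun x => x)
      sorted_list.foldl (fun output smiles => output.insert smiles label) output)
      = (fun (output : PySem.Dict String Int) (v : Int) =>
        (PySem.List.sorted (pvBucket d v) (fun x => x)).foldl
          (fun output s => output.insert s v) output) := by
    funext output label
    have hcur : (d.map Prod.fst).foldl
        (fun acc smiles => if (PySem.Dict.mk d).get? smiles == some label then acc ++ [smiles] else acc) []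
        = pvBucket d label := by
      rw [PySem.List.foldl_append_if (fun s => (PySem.Dict.mk d).get? s == some label) (fun s => s)]
      simpa using pvCurrent_eq d h label
    simp only [hcur]
  have houter := pvOuter d h (pvLabels d) PySem.Dict.empty (pvLabels_nodup d) (by simp)
    (by intro s v' _ _; simp)
  unfold pvLabels at houter
  show (List.foldl _ PySem.Dict.empty _).items = _
  rw [hstep, houter]
  simp [pvYs, pvLabels, PySem.Dict.empty]

theorem pvFlatMap_perm {α β : Type} (ls : List α) (f g : α → List β)
    (h : ∀ v ∈ ls, (f v).Perm (g v)) : (ls.flatMap f).Perm (ls.flatMap g) := by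
  induction ls with
  | nil => simp
  | cons v t ih =>
    simp only [List.flatMap_cons]
    exact (h v (by simp)).append (ih (fun x hx => h x (by simp [hx])))

theorem pvPartition (ls : List Int) (d : List (String × Int)) (hls : ls.Nodup)
    (hcov : ∀ kv ∈ d, kv.2 ∈ ls) :
    (ls.flatMap (fun v => d.filter (fun kv => kv.2 == v))).Perm d := by
  induction ls generalizing d with
  | nil =>
    have hd : d = [] := by
      cases d with
      | nil => rfl
      | cons kv t => exact absurd (hcov kv (by simp)) (by simp)
    simp [hd]
  | cons v t ih =>
    simp only [List.flatMap_cons]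
    have hrw : t.flatMap (fun v' => d.filter (fun kv => kv.2 == v'))
        = t.flatMap (fun v' => (d.filter (fun kv => !(kv.2 == v))).filter (fun kv => kv.2 == v')) := by
      apply List.flatMap_congr
      intro v' hv'
      rw [List.filter_filter]
      apply List.filter_congr
      intro kv _
      by_cases hkv : kv.2 = v'
      · have hne : v' ≠ v := fun hh => (List.nodup_cons.mp hls).1 (hh ▸ hv')
        simp [hkv, hne]
      · simp [hkv]
    rw [hrw]
    have hperm2 := ih (d.filter (fun kv => !(kv.2 == v))) (List.nodup_cons.mp hls).2
      (by
        intro kv hkv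
        have hm := List.mem_of_mem_filter hkv
        have hne : ¬(kv.2 == v) = true := by
          have := (List.mem_filter.mp hkv).2
          simpa using this
        have := hcov kv hm
        simp only [List.mem_cons] at this
        rcases this with h | h
        · exact absurd (by simpa using h) hne
        · exact h)
    exact (List.Perm.append_left _ hperm2).trans (List.filter_append_perm _ d)

theorem pvYs_perm (d : List (String × Int)) : (pvYs d).Perm d := by
  unfold pvYs
  have hchunk : ∀ v ∈ pvLabels d,
      ((PySem.List.sorted (pvBucket d v) (fun x => x)).map (fun s => (s, v))).Perm
        (d.filter (fun kv => kv.2 == v)) := by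
    intro v _
    have h1 : ((PySem.List.sorted (pvBucket d v) (fun x => x)).map (fun s => (s, v))).Perm
        ((pvBucket d v).map (fun s => (s, v))) :=
      (PySem.List.sorted_perm (pvBucket d v) (fun x => x) false).map _
    have h2 : (pvBucket d v).map (fun s => (s, v)) = d.filter (fun kv => kv.2 == v) := by
      unfold pvBucket
      rw [List.map_map]
      have hcg : ∀ kv ∈ d.filter (fun kv => kv.2 == v),
          ((fun s => (s, v)) ∘ Prod.fst) kv = id kv := by
        intro kv hkv
        have hv : kv.2 = v := by simpa using (List.mem_filter.mp hkv).2
        simp only [Function.comp_apply, id_eq]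
        rw [← hv]
      rw [List.map_congr_left hcg, List.map_id]
    rw [h2] at h1
    exact h1
  have hcov : ∀ kv ∈ d, kv.2 ∈ pvLabels d := by
    intro kv hkv
    unfold pvLabels
    rw [(PySem.List.sorted_perm _ _ _).mem_iff, PySem.Set.mem_ofList]
    exact List.mem_map_of_mem hkv
  exact (pvFlatMap_perm _ _ _ hchunk).trans (pvPartition (pvLabels d) d (pvLabels_nodup d) hcov)

theorem pvYs_pairwise (d : List (String × Int)) (h : (d.map Prod.fst).Nodup) :
    (pvYs d).Pairwise (fun a b => toLex (a.2, a.1) < toLex (b.2, b.1)) := by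
  unfold pvYs
  rw [List.pairwise_flatMap]
  constructor
  · intro v _
    rw [List.pairwise_map]
    have hsl : (PySem.List.sorted (pvBucket d v) (fun x => x)).Pairwise (fun a b => a < b) :=
      pvStrict (pvBucket d v) (fun x => x) (pvBucket_nodup d h v) (by intro a _ b _ hh; exact hh)
    refine hsl.imp ?_
    intro a b hab
    exact Prod.Lex.lt_iff.mpr (Or.inr ⟨rfl, hab⟩)
  · have := pvLabels_lt d
    refine this.imp ?_
    intro v v' hvv' x hx y hy
    rcases List.mem_map.mp hx with ⟨s, _, rfl⟩
    rcases List.mem_map.mp hy with ⟨t', _, rfl⟩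
    exact Prod.Lex.lt_iff.mpr (Or.inl hvv')

theorem pvCmp_eq (a b : String × Int) :
    (decide (a.2 < b.2) || (!decide (b.2 < a.2) && decide (a.1 < b.1)))
      = decide (toLex (a.2, a.1) < toLex (b.2, b.1)) := by
  by_cases h1 : a.2 < b.2 <;> by_cases h2 : b.2 < a.2 <;>
    simp [Prod.Lex.lt_iff, h1, h2] <;> omega

theorem pvB_eq (d : List (String × Int)) (h : (d.map Prod.fst).Nodup) :
    sort_smiles_label_alt d = pvYs d := by
  have hs2 : PySem.List.sorted2 d (fun kv => kv.2) (fun kv => kv.1)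
      = PySem.List.sorted d (fun kv => toLex (kv.2, kv.1)) := by
    simp only [PySem.List.sorted2, PySem.List.sorted]
    have hcmp : (fun (a b : String × Int) =>
        decide (a.2 < b.2) || (!decide (b.2 < a.2) && decide (a.1 < b.1)))
        = (fun (a b : String × Int) => decide (toLex (a.2, a.1) < toLex (b.2, b.1))) := by
      funext a b
      exact pvCmp_eq a b
    simp only [Bool.false_eq_true, if_false, hcmp]
  have hsorted : PySem.List.sorted d (fun kv => toLex (kv.2, kv.1)) = pvYs d :=
    PySem.List.sorted_eq_of_perm_of_pairwise_lt d (pvYs d) _ (pvYs_perm d) (pvYs_pairwise d h)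
  have hnodup : ((pvYs d).map Prod.fst).Nodup := ((pvYs_perm d).map Prod.fst).nodup_iff.mpr h
  have hfresh : ∀ a ∈ pvYs d,
      (PySem.Dict.empty : PySem.Dict String Int).contains (Prod.fst a) = false := by
    intro a _; simp
  have hitems := PySem.Dict.items_foldl_insert_fresh (pvYs d) Prod.fst Prod.snd
    PySem.Dict.empty hfresh hnodup
  unfold sort_smiles_label_alt
  rw [hs2, hsorted]
  show (List.foldl (fun acc p => acc.insert p.1 p.2)
    (PySem.Dict.empty : PySem.Dict String Int) (pvYs d)).items = pvYs d
  exact hitems.trans (by simp [PySem.Dict.empty])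

-- ===== VERDICT (by name: the statement is the Claim_ definition above) =====
theorem sort_smiles_label_spec : Claim_equal_sort_smiles_label := by
  intro d _ hpre
  unfold Spec_sort_smiles_label
  rw [pvA_eq d hpre, pvB_eq d hpre]
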